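-- pv_equiv track=rewrite | github.com/bencardoen/CSRM | src/expression/node.py | positionToDepth
-- ===== SOURCE A (Python) =====
-- def positionToDepth(pos):
--     """
--     Use the structure of the binary tree and its list encoding to retrieve depth in log(N) steps without relying on a parent pointer.
--     """
--     i = 0
--     while pos:
--         if pos & 2:
--             pos -= 1
--         pos >>= 1
--         i+=1
--     return i
-- ===== SOURCE B (Python) =====
-- def positionToDepth(pos):
--     return (pos + 1).bit_length() - 1
-- ===== Notes on version B (the rewrite author's own statement) =====
-- stated objective: simpler
-- what changed: Replaces the shift-and-count while loop with the closed form (pos+1).bit_length()-1 = floor(log2(pos+1)); no loop, no branches.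
import Mathlib
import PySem

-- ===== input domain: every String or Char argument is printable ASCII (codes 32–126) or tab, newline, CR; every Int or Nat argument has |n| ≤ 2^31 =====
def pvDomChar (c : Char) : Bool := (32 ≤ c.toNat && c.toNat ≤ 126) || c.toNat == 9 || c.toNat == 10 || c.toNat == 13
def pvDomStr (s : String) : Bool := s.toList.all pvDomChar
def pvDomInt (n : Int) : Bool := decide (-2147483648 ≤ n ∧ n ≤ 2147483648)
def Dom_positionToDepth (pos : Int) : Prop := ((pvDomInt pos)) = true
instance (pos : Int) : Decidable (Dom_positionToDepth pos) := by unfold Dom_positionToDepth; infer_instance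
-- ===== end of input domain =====

-- B replaces A's shift-and-count loop with the closed form (pos+1).bit_length()-1; simpler, no loop.
-- Pre_ excludes negative pos, on which Python A's `while pos` loop never terminates.


-- ===== PORT A =====
-- `while pos: if pos & 2: pos -= 1; pos >>= 1; i += 1`; the `pos ≤ 0` guard is the
-- totality guard (Python diverges on negative pos, excluded by Pre_).
def pdLoopA (pos : Int) (i : Int) : Int :=
  if h : pos ≤ 0 then i
  else pdLoopA (PySem.Int.floordiv (if Int.land pos 2 ≠ 0 then pos - 1 else pos) 2) (i + 1)
termination_by pos.toNat
decreasing_by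
  rw [PySem.Int.floordiv_eq_ediv_of_pos (by omega)]
  split <;> omega

def positionToDepth (pos : Int) : Int := pdLoopA pos 0

-- ===== PORT B =====
def positionToDepth_alt (pos : Int) : Int := (PySem.Int.bitLength (pos + 1) : Int) - 1

-- ===== PRECONDITION & SPEC =====
-- Pre_ excludes pos < 0: there Python A's `while pos` loop never terminates (no return).
def Pre_positionToDepth (pos : Int) : Prop := 0 ≤ pos
instance (pos : Int) : Decidable (Pre_positionToDepth pos) := by unfold Pre_positionToDepth; infer_instance
def pvWitness_positionToDepth : Int := 5

def Spec_positionToDepth (pos : Int) (out : Int) : Prop := out = positionToDepth_alt pos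
instance (pos : Int) (out : Int) : Decidable (Spec_positionToDepth pos out) := by unfold Spec_positionToDepth; infer_instance

-- ===== CLAIM (what is proved, stated in full; the proofs are below) =====
def Claim_equal_positionToDepth : Prop := ∀ (pos : Int), Dom_positionToDepth pos → Pre_positionToDepth pos → Spec_positionToDepth pos (positionToDepth pos)

-- ===== LEMMAS AND PROOFS =====

-- `pos & 2` tested on a nonnegative int is the bit at position 1, i.e. n % 4 ≥ 2
theorem land_two_iff (n : Nat) : Int.land (n : Int) 2 ≠ 0 ↔ n % 4 ≥ 2 := by
  have hcast : Int.land (n : Int) 2 = ((n &&& 2 : Nat) : Int) := rfl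
  have h2 := Nat.and_two_pow n 1
  norm_num at h2
  have hb : n.testBit 1 = true ↔ n % 4 ≥ 2 := by
    rw [Nat.testBit_eq_decide_div_mod_eq]
    simp
    omega
  rw [hcast, h2]
  rcases h : n.testBit 1 <;> simp_all

theorem log2_succ_of_even (k : Nat) (h2 : 2 ≤ k) (he : k % 2 = 0) :
    Nat.log2 (k + 1) = Nat.log2 k := by
  conv_lhs => rw [Nat.log2_def]
  conv_rhs => rw [Nat.log2_def]
  have h1 : 2 ≤ k + 1 := by omega
  have h3 : (k + 1) / 2 = k / 2 := by omega
  simp [h1, h2, h3]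

-- one iteration of A's loop peels one off log2(n+1)
theorem log2_step (n : Nat) (h1 : 1 ≤ n) :
    Nat.log2 (n + 1) = Nat.log2 ((if n % 4 ≥ 2 then n - 1 else n) / 2 + 1) + 1 := by
  rw [Nat.log2_def]
  have h2 : 2 ≤ n + 1 := by omega
  simp only [h2, if_true]
  congr 1
  split_ifs with hc
  · congr 1; omega
  · rcases Nat.mod_two_eq_zero_or_one n with he | ho
    · -- n % 4 = 0 (since ¬ n % 4 ≥ 2 and n even), so n ≥ 4 and n/2 is even
      have h5 : (n + 1) / 2 = n / 2 := by omega
      rw [h5, log2_succ_of_even (n / 2) (by omega) (by omega)]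
    · -- n odd, n % 4 = 1
      congr 1
      omega

theorem pdLoopA_eq (n : Nat) : ∀ i : Int, pdLoopA (n : Int) i = i + (Nat.log2 (n + 1) : Int) := by
  induction n using Nat.strong_induction_on with
  | _ n ih =>
    intro i
    rw [pdLoopA]
    by_cases h0 : n = 0
    · subst h0
      have h1 : Nat.log2 1 = 0 := by decide
      simp [h1]
    · have hpos : ¬ ((n : Int) ≤ 0) := by exact_mod_cast by omega
      simp only [hpos, dite_false]
      have harg : PySem.Int.floordiv (if Int.land (n : Int) 2 ≠ 0 then (n : Int) - 1 else n) 2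
          = (((if n % 4 ≥ 2 then n - 1 else n) / 2 : Nat) : Int) := by
        rw [PySem.Int.floordiv_eq_ediv_of_pos (by omega)]
        by_cases hc : n % 4 ≥ 2
        · simp only [(land_two_iff n).2 hc, ne_eq, not_false_eq_true, if_true, hc]
          omega
        · have : ¬ (Int.land (n : Int) 2 ≠ 0) := fun h => hc ((land_two_iff n).1 h)
          simp only [this, if_false, hc]
          omega
      rw [harg]
      have hlt : (if n % 4 ≥ 2 then n - 1 else n) / 2 < n := by split <;> omega
      rw [ih _ hlt (i + 1)]
      rw [log2_step n (by omega)]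
      push_cast
      ring

-- PySem.Int.bitLength in terms of Nat.log2
theorem bitLengthAux_eq : ∀ (fuel n : Nat), n < fuel →
    PySem.Int.bitLengthAux fuel n = if n = 0 then 0 else Nat.log2 n + 1 := by
  intro fuel
  induction fuel with
  | zero => intro n h; omega
  | succ f ihf =>
    intro n h
    rw [PySem.Int.bitLengthAux]
    by_cases h0 : n = 0
    · simp [h0]
    · simp only [h0, if_false]
      rw [ihf (n / 2) (by omega)]
      by_cases h1 : n / 2 = 0
      · have hn1 : n = 1 := by omega
        have hl : Nat.log2 1 = 0 := by decide
        simp [hn1, hl]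
      · simp only [h1, if_false]
        conv_rhs => rw [Nat.log2_def]
        have h2n : 2 ≤ n := by omega
        simp [h2n]

theorem bitLength_eq_log2 (m : Int) (h : 0 < m) :
    PySem.Int.bitLength m = Nat.log2 m.natAbs + 1 := by
  unfold PySem.Int.bitLength
  rw [bitLengthAux_eq (m.natAbs + 1) m.natAbs (by omega)]
  have : m.natAbs ≠ 0 := by omega
  simp [this]

-- ===== VERDICT (by name: the statement is the Claim_ definition above) =====
theorem positionToDepth_spec : Claim_equal_positionToDepth := by
  intro pos _ hpre
  unfold Pre_positionToDepth at hpre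
  unfold Spec_positionToDepth positionToDepth positionToDepth_alt
  obtain ⟨n, rfl⟩ : ∃ n : Nat, pos = (n : Int) := ⟨pos.toNat, by omega⟩
  rw [pdLoopA_eq n 0, bitLength_eq_log2 (n + 1) (by omega)]
  have : ((n : Int) + 1).natAbs = n + 1 := by omega
  rw [this]
  push_cast
  ring
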